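-- pv_equiv track=rewrite | github.com/D-Neumayer/Python | CS-50/plates/plates.py | first_two
-- ===== SOURCE A (Python) =====
-- def first_two(s):
--     count = 1
--     for i in s:
--         if count <= 2:
--             if not i.isalpha():
--                 return True
--             count += 1
--     return False
-- ===== SOURCE B (Python) =====
-- def first_two(s):
--     return bool(s) and not s[:2].isalpha()
-- ===== Notes on version B (the rewrite author's own statement) =====
-- stated objective: simpler
-- what changed: Replaces the counter loop (which keeps iterating the whole string after the first two characters) with a single closed-form expression: slice the first two characters and test them with str.isalpha, with a non-emptiness guard since the empty slice is not alphabetic.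
import Mathlib
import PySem

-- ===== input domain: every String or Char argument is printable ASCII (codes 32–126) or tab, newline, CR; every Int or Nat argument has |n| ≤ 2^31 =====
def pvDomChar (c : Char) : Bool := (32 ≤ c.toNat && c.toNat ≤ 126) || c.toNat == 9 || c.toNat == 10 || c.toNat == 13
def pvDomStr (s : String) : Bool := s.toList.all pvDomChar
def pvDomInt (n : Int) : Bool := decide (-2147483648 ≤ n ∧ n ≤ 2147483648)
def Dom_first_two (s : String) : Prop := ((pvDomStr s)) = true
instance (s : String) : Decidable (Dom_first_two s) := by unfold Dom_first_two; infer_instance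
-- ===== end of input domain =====

-- B replaces A's counter loop by one closed-form expression on the two-character slice (simpler).

-- ===== PORT A =====
def first_two_go : List Char → Nat → Bool
  | [], _ => false
  | c :: rest, count =>
    if count ≤ 2 then
      if !(PySem.Chars.isalpha c) then true
      else first_two_go rest (count + 1)
    else first_two_go rest count

def first_two (s : String) : Bool := first_two_go s.toList 1

-- ===== PORT B =====
def first_two_alt (s : String) : Bool :=
  !s.toList.isEmpty && !(PySem.Chars.strIsalpha (PySem.Chars.slice s.toList none (some 2)))

-- ===== PRECONDITION & SPEC =====
def Spec_first_two (s : String) (out : Bool) : Prop := out = first_two_alt s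
instance (s : String) (out : Bool) : Decidable (Spec_first_two s out) := by unfold Spec_first_two; infer_instance

-- ===== CLAIM (what is proved, stated in full; the proofs are below) =====
def Claim_equal_first_two : Prop := ∀ (s : String), Dom_first_two s → Spec_first_two s (first_two s)

-- ===== LEMMAS AND PROOFS =====
theorem first_two_go_big (l : List Char) (n : Nat) (h : 3 ≤ n) : first_two_go l n = false := by
  induction l generalizing n with
  | nil => rfl
  | cons c rest ih =>
    simp only [first_two_go]
    rw [if_neg (by omega)]
    exact ih n h

-- ===== VERDICT (by name: the statement is the Claim_ definition above) =====
theorem first_two_spec : Claim_equal_first_two := by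
  intro s _
  unfold Spec_first_two first_two first_two_alt
  match h : s.toList with
  | [] => simp [first_two_go, PySem.Chars.strIsalpha, PySem.Chars.slice]
  | [c] =>
    by_cases hc : PySem.Chars.isalpha c = true <;>
      simp [first_two_go, PySem.Chars.strIsalpha, PySem.List.slice_to, hc]
  | c :: d :: rest =>
    by_cases hc : PySem.Chars.isalpha c = true <;>
      by_cases hd : PySem.Chars.isalpha d = true <;>
      simp [first_two_go, first_two_go_big, PySem.Chars.strIsalpha,
        PySem.List.slice_to, hc, hd]
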